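-- pv_equiv track=rewrite | github.com/theinterneti/TTA.dev | scripts/mcp/config_parser.py | _get_preferred_servers
-- ===== SOURCE A (Python) =====
-- from typing import Any
--
-- def _get_preferred_servers(servers: dict[str, Any]) -> list[str]:
--     """Determine preferred servers based on tags."""
--     preferred = []
--
--     # Priority order based on tags
--     priority_tags = [
--         "documentation",
--         "reasoning",
--         "code-analysis",
--         "vcs",
--     ]
--
--     for tag in priority_tags:
--         for name, config in servers.items():
--             if tag in config.get("tags", []):
--                 if name not in preferred:
--                     preferred.append(name)
--
--     return preferred[:3]  # Top 3 preferred servers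
-- ===== SOURCE B (Python) =====
-- def _get_preferred_servers(servers):
--     """Determine preferred servers based on tags (bucket by first matching priority tag, one pass)."""
--     priority_tags = [
--         "documentation",
--         "reasoning",
--         "code-analysis",
--         "vcs",
--     ]
--     buckets = [[], [], [], []]
--     for name, config in servers.items():
--         tags = config.get("tags", [])
--         rank = next((i for i, tag in enumerate(priority_tags) if tag in tags), None)
--         if rank is not None:
--             buckets[rank].append(name)
--     return [name for bucket in buckets for name in bucket][:3]
-- ===== Notes on version B (the rewrite author's own statement) =====
-- stated objective: alternative
-- what changed: B makes a single pass over servers, computing each server's first-matching priority-tag index and bucketing the name under it, then concatenates the four buckets and takes the first 3, instead of A's outer loop over tags that rescans all servers per tag with a linear 'name not in preferred' membership test.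
import Mathlib
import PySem

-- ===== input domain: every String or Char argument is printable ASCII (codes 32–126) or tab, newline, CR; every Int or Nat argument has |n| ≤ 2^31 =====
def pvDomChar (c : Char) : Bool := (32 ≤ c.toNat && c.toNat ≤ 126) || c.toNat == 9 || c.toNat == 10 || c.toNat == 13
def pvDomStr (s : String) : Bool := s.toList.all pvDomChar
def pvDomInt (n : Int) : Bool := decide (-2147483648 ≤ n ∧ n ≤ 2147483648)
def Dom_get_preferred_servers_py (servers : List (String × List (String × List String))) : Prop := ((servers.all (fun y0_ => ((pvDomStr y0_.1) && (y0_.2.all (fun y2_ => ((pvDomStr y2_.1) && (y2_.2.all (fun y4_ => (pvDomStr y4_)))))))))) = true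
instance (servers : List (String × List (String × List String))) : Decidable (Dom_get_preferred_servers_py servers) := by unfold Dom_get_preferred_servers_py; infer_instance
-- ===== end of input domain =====

-- B buckets each server under the index of its first matching priority tag in ONE pass over the
-- servers instead of A's per-tag rescans with a linear dedup membership test (objective: alternative).

-- ===== PORT A =====
def pvPriorityTags : List String := ["documentation", "reasoning", "code-analysis", "vcs"]

def get_preferred_servers_py (servers : List (String × List (String × List String))) : List String :=
  let d := PySem.Dict.ofList servers
  let preferred : List String :=
    pvPriorityTags.foldl (fun pref tag =>
      d.items.foldl (fun pref p =>
        if ((PySem.Dict.ofList p.2).getD "tags" []).contains tag then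
          if pref.contains p.1 then pref else pref ++ [p.1]
        else pref) pref) []
  PySem.List.slice preferred none (some 3)

-- ===== PORT B =====
-- buckets[rank].append(name)
def pvAppendAt : List (List String) → Nat → String → List (List String)
  | [], _, _ => []
  | b :: bs, 0, x => (b ++ [x]) :: bs
  | b :: bs, n+1, x => b :: pvAppendAt bs n x

def get_preferred_servers_py_alt (servers : List (String × List (String × List String))) : List String :=
  let d := PySem.Dict.ofList servers
  let buckets : List (List String) :=
    d.items.foldl (fun bs p =>
      let tags := (PySem.Dict.ofList p.2).getD "tags" []
      -- rank = next((i for i, tag in enumerate(priority_tags) if tag in tags), None)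
      match pvPriorityTags.findIdx? (fun tag => tags.contains tag) with
      | some rank => pvAppendAt bs rank p.1
      | none => bs) [[], [], [], []]
  PySem.List.slice buckets.flatten none (some 3)

-- ===== PRECONDITION & SPEC =====
def Spec_get_preferred_servers_py (servers : List (String × List (String × List String))) (out : List String) : Prop := out = get_preferred_servers_py_alt servers
instance (servers : List (String × List (String × List String))) (out : List String) : Decidable (Spec_get_preferred_servers_py servers out) := by unfold Spec_get_preferred_servers_py; infer_instance

-- ===== CLAIM (what is proved, stated in full; the proofs are below) =====
def Claim_equal_get_preferred_servers_py : Prop := ∀ (servers : List (String × List (String × List String))), Dom_get_preferred_servers_py servers → Spec_get_preferred_servers_py servers (get_preferred_servers_py servers)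

-- ===== LEMMAS AND PROOFS =====

-- tags of one server entry, and its priority rank (first matching tag index)
def pvTagsOf (p : String × List (String × List String)) : List String :=
  (PySem.Dict.ofList p.2).getD "tags" []

def pvRank (p : String × List (String × List String)) : Option Nat :=
  pvPriorityTags.findIdx? (fun tag => (pvTagsOf p).contains tag)

-- the names of the servers whose rank is exactly i, in order
def pvSel (i : Nat) (l : List (String × List (String × List String))) : List String :=
  (l.filter (fun p => pvRank p == some i)).map (·.1)

theorem pvRank_eq (p : String × List (String × List String)) :
    pvRank p = (if (pvTagsOf p).contains "documentation" then some 0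
      else if (pvTagsOf p).contains "reasoning" then some 1
      else if (pvTagsOf p).contains "code-analysis" then some 2
      else if (pvTagsOf p).contains "vcs" then some 3
      else none) := by
  simp [pvRank, pvPriorityTags, List.findIdx?_cons]
  split_ifs <;> simp_all

theorem pvSel_cons (i : Nat) (p : String × List (String × List String))
    (l : List (String × List (String × List String))) :
    pvSel i (p :: l) = (if pvRank p = some i then [p.1] else []) ++ pvSel i l := by
  simp only [pvSel, List.filter_cons]
  split_ifs with h h' h' <;> simp_all

-- ---- B side: the fold fills the four buckets with pvSel 0..3 ----
theorem pvB_fold (l : List (String × List (String × List String)))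
    (b0 b1 b2 b3 : List String) :
    l.foldl (fun bs p =>
      let tags := (PySem.Dict.ofList p.2).getD "tags" []
      match pvPriorityTags.findIdx? (fun tag => tags.contains tag) with
      | some rank => pvAppendAt bs rank p.1
      | none => bs) [b0, b1, b2, b3]
    = [b0 ++ pvSel 0 l, b1 ++ pvSel 1 l, b2 ++ pvSel 2 l, b3 ++ pvSel 3 l] := by
  induction l generalizing b0 b1 b2 b3 with
  | nil => simp [pvSel]
  | cons p l ih =>
    have hr := pvRank_eq p
    rw [List.foldl_cons]
    have hstep : (let tags := (PySem.Dict.ofList p.2).getD "tags" []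
        match pvPriorityTags.findIdx? (fun tag => tags.contains tag) with
        | some rank => pvAppendAt [b0, b1, b2, b3] rank p.1
        | none => [b0, b1, b2, b3])
        = (match pvRank p with
           | some r => pvAppendAt [b0, b1, b2, b3] r p.1
           | none => [b0, b1, b2, b3]) := rfl
    rw [hstep, hr]
    split_ifs with h0 h1 h2 h3
    · have hv : pvRank p = some 0 := by rw [hr, if_pos h0]
      simp only [pvAppendAt]
      rw [ih]
      simp [pvSel_cons, hv]
    · have hv : pvRank p = some 1 := by rw [hr, if_neg h0, if_pos h1]
      simp only [pvAppendAt]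
      rw [ih]
      simp [pvSel_cons, hv]
    · have hv : pvRank p = some 2 := by rw [hr, if_neg h0, if_neg h1, if_pos h2]
      simp only [pvAppendAt]
      rw [ih]
      simp [pvSel_cons, hv]
    · have hv : pvRank p = some 3 := by rw [hr, if_neg h0, if_neg h1, if_neg h2, if_pos h3]
      simp only [pvAppendAt]
      rw [ih]
      simp [pvSel_cons, hv]
    · have hv : pvRank p = none := by rw [hr, if_neg h0, if_neg h1, if_neg h2, if_neg h3]
      rw [ih]
      simp [pvSel_cons, hv]

-- ---- A side ----
-- one pass of the inner loop over l for a fixed tag, from accumulator acc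
theorem pvA_inner (tag : String) (l : List (String × List (String × List String)))
    (acc : List String) (hnd : (l.map (·.1)).Nodup) :
    l.foldl (fun pref p =>
      if ((PySem.Dict.ofList p.2).getD "tags" []).contains tag then
        if pref.contains p.1 then pref else pref ++ [p.1]
      else pref) acc
    = acc ++ (l.filter (fun p => (pvTagsOf p).contains tag && !(acc.contains p.1))).map (·.1) := by
  induction l generalizing acc with
  | nil => simp
  | cons p l ih =>
    simp only [List.map_cons, List.nodup_cons] at hnd
    obtain ⟨hp, hnd⟩ := hnd
    rw [List.foldl_cons, List.filter_cons]
    by_cases hc : (pvTagsOf p).contains tag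
    · have hc' : ((PySem.Dict.ofList p.2).getD "tags" []).contains tag = true := hc
      by_cases hm : acc.contains p.1
      · rw [if_pos hc', if_pos hm, if_neg (by simp_all [List.contains_eq_mem]), ih _ hnd]
      · have hfc : ∀ q ∈ l, ((pvTagsOf q).contains tag && !((acc ++ [p.1]).contains q.1))
            = ((pvTagsOf q).contains tag && !(acc.contains q.1)) := by
          intro q hq
          have hne : q.1 ≠ p.1 := fun h => hp (h ▸ List.mem_map_of_mem hq)
          simp [List.contains_eq_mem, hne]
        rw [if_pos hc', if_neg hm, ih _ hnd, List.filter_congr hfc,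
          if_pos (by simp_all [List.contains_eq_mem])]
        simp
    · have hc' : ¬(((PySem.Dict.ofList p.2).getD "tags" []).contains tag = true) := hc
      rw [if_neg hc', if_neg (by simp_all [List.contains_eq_mem]), ih _ hnd]

-- names of servers (with nodup names) contained in a filtered-name list iff the filter holds
theorem pvContains_filter_map (l : List (String × List (String × List String)))
    (hnd : (l.map (·.1)).Nodup) (g : (String × List (String × List String)) → Bool)
    (p : String × List (String × List String)) (hp : p ∈ l) :
    ((l.filter g).map (·.1)).contains p.1 = g p := by
  by_cases h : g p
  · simp only [h, List.contains_eq_mem, decide_eq_true_iff]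
    exact List.mem_map_of_mem (List.mem_filter.mpr ⟨hp, h⟩)
  · simp only [h, List.contains_eq_mem, decide_eq_false_iff_not]
    intro hmem
    obtain ⟨q, hq, hq1⟩ := List.mem_map.mp hmem
    obtain ⟨hql, hqg⟩ := List.mem_filter.mp hq
    have := List.inj_on_of_nodup_map hnd (List.mem_of_mem_filter hq) hp hq1
    rw [this] at hqg
    simp [hqg] at h

-- the full A accumulator equals the four rank tiers concatenated
theorem pvA_eq_sel (l : List (String × List (String × List String)))
    (hnd : (l.map (·.1)).Nodup) :
    pvPriorityTags.foldl (fun pref tag =>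
      l.foldl (fun pref p =>
        if ((PySem.Dict.ofList p.2).getD "tags" []).contains tag then
          if pref.contains p.1 then pref else pref ++ [p.1]
        else pref) pref) []
    = pvSel 0 l ++ pvSel 1 l ++ pvSel 2 l ++ pvSel 3 l := by
  have hmem : ∀ (i : Nat) (p : String × List (String × List String)), p ∈ l →
      ((pvSel i l).contains p.1) = (pvRank p == some i) := by
    intro i p hp
    simp only [pvSel]
    exact pvContains_filter_map l hnd _ p hp
  simp only [pvPriorityTags, List.foldl_cons, List.foldl_nil]
  rw [pvA_inner "documentation" l [] hnd, List.nil_append]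
  have e0 : (l.filter (fun p => (pvTagsOf p).contains "documentation"
      && !(([] : List String).contains p.1))).map (·.1) = pvSel 0 l := by
    simp only [pvSel]
    congr 1
    refine List.filter_congr (fun p hp => ?_)
    rw [pvRank_eq]
    split_ifs with h0 h1 h2 h3 <;> simp_all
  rw [e0, pvA_inner "reasoning" l (pvSel 0 l) hnd]
  have e1 : (l.filter (fun p => (pvTagsOf p).contains "reasoning"
      && !((pvSel 0 l).contains p.1))).map (·.1) = pvSel 1 l := by
    simp only [pvSel]
    congr 1
    refine List.filter_congr (fun p hp => ?_)
    have h := hmem 0 p hp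
    simp only [pvSel] at h
    rw [h, pvRank_eq]
    split_ifs with h0 h1 h2 h3 <;> simp_all
  rw [e1, pvA_inner "code-analysis" l (pvSel 0 l ++ pvSel 1 l) hnd]
  have e2 : (l.filter (fun p => (pvTagsOf p).contains "code-analysis"
      && !((pvSel 0 l ++ pvSel 1 l).contains p.1))).map (·.1) = pvSel 2 l := by
    simp only [pvSel]
    congr 1
    refine List.filter_congr (fun p hp => ?_)
    have h0' := hmem 0 p hp
    have h1' := hmem 1 p hp
    simp only [pvSel] at h0' h1'
    rw [List.contains_append, h0', h1', pvRank_eq]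
    split_ifs with h0 h1 h2 h3 <;> simp_all
  rw [e2, pvA_inner "vcs" l (pvSel 0 l ++ pvSel 1 l ++ pvSel 2 l) hnd]
  have e3 : (l.filter (fun p => (pvTagsOf p).contains "vcs"
      && !((pvSel 0 l ++ pvSel 1 l ++ pvSel 2 l).contains p.1))).map (·.1) = pvSel 3 l := by
    simp only [pvSel]
    congr 1
    refine List.filter_congr (fun p hp => ?_)
    have h0' := hmem 0 p hp
    have h1' := hmem 1 p hp
    have h2' := hmem 2 p hp
    simp only [pvSel] at h0' h1' h2'
    rw [List.contains_append, List.contains_append, h0', h1', h2', pvRank_eq]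
    split_ifs with h0 h1 h2 h3 <;> simp_all
  rw [e3]

-- ===== VERDICT (by name: the statement is the Claim_ definition above) =====
theorem get_preferred_servers_py_spec : Claim_equal_get_preferred_servers_py := by
  intro servers _
  unfold Spec_get_preferred_servers_py
  simp only [get_preferred_servers_py, get_preferred_servers_py_alt]
  have hnd : (((PySem.Dict.ofList servers).items.map (·.1)) : List String).Nodup := by
    have := PySem.Dict.nodup_keys_ofList (ps := servers)
    simpa [PySem.Dict.keys] using this
  rw [pvB_fold, pvA_eq_sel _ hnd]
  simp
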